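-- pv_equiv track=rewrite | github.com/StevenPvr/trying-to-forecast-stock-returns | core/src/meta_model/data/data_reference/wrds_provider.py | _lookup_variants
-- ===== SOURCE A (Python) =====
-- _MANUAL_SECURITY_ALIASES: dict[str, tuple[str, ...]] = {
--     "ANTM": ("ELV",),
-- }
--
-- def _lookup_variants(symbol: str) -> set[str]:
--     base = str(symbol).strip().upper()
--     if not base:
--         return set()
--     variants = {
--         base,
--         base.replace(".", ""),
--         base.replace(".", "-"),
--         base.replace("-", ""),
--         base.replace("-", "."),
--     }
--     for alias in _MANUAL_SECURITY_ALIASES.get(base, ()):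
--         variants.update(_lookup_variants(alias))
--     return {value for value in variants if value}
-- ===== SOURCE B (Python) =====
-- _MANUAL_SECURITY_ALIASES: dict[str, tuple[str, ...]] = {
--     "ANTM": ("ELV",),
-- }
--
-- def _lookup_variants(symbol: str) -> set[str]:
--     result = set()
--     work = [symbol]
--     while work:
--         sym = work.pop(0)
--         base = str(sym).strip().upper()
--         if not base:
--             continue
--         result.add(base)
--         result.add(base.replace(".", ""))
--         result.add(base.replace(".", "-"))
--         result.add(base.replace("-", ""))
--         result.add(base.replace("-", "."))
--         work.extend(_MANUAL_SECURITY_ALIASES.get(base, ()))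
--     return {v for v in result if v}
-- ===== Notes on version B (the rewrite author's own statement) =====
-- stated objective: alternative
-- what changed: Replaces A's recursion through the manual alias map by an iterative worklist loop that accumulates all variants into a single set and filters once at the end.
import Mathlib
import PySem

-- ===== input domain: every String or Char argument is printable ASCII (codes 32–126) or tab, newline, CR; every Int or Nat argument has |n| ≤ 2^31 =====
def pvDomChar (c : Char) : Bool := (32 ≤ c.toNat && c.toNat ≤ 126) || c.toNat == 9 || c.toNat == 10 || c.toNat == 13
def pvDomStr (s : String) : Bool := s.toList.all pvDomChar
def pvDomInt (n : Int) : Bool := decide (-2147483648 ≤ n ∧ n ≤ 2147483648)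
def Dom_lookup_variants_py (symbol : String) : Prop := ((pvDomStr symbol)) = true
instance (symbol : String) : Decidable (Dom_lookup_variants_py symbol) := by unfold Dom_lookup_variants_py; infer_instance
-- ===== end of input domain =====

-- B replaces A's recursion through the manual alias map by an iterative worklist loop over one
-- accumulating set (objective: alternative decomposition; same cost).

-- ===== PORT A =====
def pvAliases : PySem.Dict String (List String) := ⟨[("ANTM", ["ELV"])]⟩

-- getD on the literal alias dict, needed by both termination arguments and the proofs
theorem pv_getD_lit (base : String) :
    pvAliases.getD base [] = if base = "ANTM" then ["ELV"] else [] := by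
  by_cases hb : base = "ANTM"
  · simp [pvAliases, PySem.Dict.getD, PySem.Dict.get?, hb]
  · simp [pvAliases, PySem.Dict.getD, PySem.Dict.get?, hb, Ne.symm hb]

theorem pv_alias_mem (base a : String) (h : a ∈ pvAliases.getD base []) :
    base = "ANTM" ∧ a = "ELV" := by
  by_cases hb : base = "ANTM"
  · rw [pv_getD_lit, if_pos hb] at h
    exact ⟨hb, by simpa using h⟩
  · rw [pv_getD_lit, if_neg hb] at h
    exact absurd h (List.not_mem_nil)

-- the alias map sends "ANTM" to "ELV", whose base is not itself aliased: the Python recursion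
-- has depth ≤ 2, which this measure records for the termination checker
def lookup_variants_py (symbol : String) : List String :=
  let base := PySem.Str.upper (PySem.Str.strip symbol)
  if base = "" then []
  else
    let variants : PySem.Set String := PySem.Set.ofList
      [base, PySem.Str.replace base "." "", PySem.Str.replace base "." "-",
       PySem.Str.replace base "-" "", PySem.Str.replace base "-" "."]
    let variants := (pvAliases.getD base []).attach.foldl
      (fun s a => PySem.Set.update s (lookup_variants_py a.1)) variants
    PySem.Set.ofList (variants.filter (fun v => v ≠ ""))
termination_by (if PySem.Str.upper (PySem.Str.strip symbol) = "ANTM" then 1 else 0 : Nat)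
decreasing_by
  obtain ⟨hbase, ha⟩ := pv_alias_mem _ _ a.2
  have hb2 : PySem.Str.upper (PySem.Str.strip symbol) = "ANTM" := hbase
  rw [ha, hb2]
  decide

-- ===== PORT B =====
-- the worklist loop of Source B: pop the front symbol, add its five variants, enqueue its aliases
def lookup_variants_py_alt_loop (work : List String) (result : PySem.Set String) :
    PySem.Set String :=
  match work with
  | [] => result
  | sym :: rest =>
    let base := PySem.Str.upper (PySem.Str.strip sym)
    if base = "" then lookup_variants_py_alt_loop rest result
    else
      let result := ((((result.add base).add (PySem.Str.replace base "." "")).add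
        (PySem.Str.replace base "." "-")).add (PySem.Str.replace base "-" "")).add
        (PySem.Str.replace base "-" ".")
      lookup_variants_py_alt_loop (rest ++ pvAliases.getD base []) result
termination_by
  (work.map (fun s => if PySem.Str.upper (PySem.Str.strip s) = "ANTM" then 2 else 1)).sum
decreasing_by
  · simp only [List.map_cons, List.sum_cons]
    have : 1 ≤ (if PySem.Str.upper (PySem.Str.strip sym) = "ANTM" then 2 else 1) := by
      split <;> omega
    omega
  · rw [pv_getD_lit]
    by_cases hb : PySem.Str.upper (PySem.Str.strip sym) = "ANTM"
    · have hELV : PySem.Str.upper (PySem.Str.strip "ELV") = "ELV" := by decide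
      simp only [List.map_append, List.sum_append, List.map_cons, List.sum_cons, hb]
      simp [hELV]
      omega
    · simp only [if_neg hb, List.append_nil, List.map_cons, List.sum_cons]
      have : 1 ≤ (if PySem.Str.upper (PySem.Str.strip sym) = "ANTM" then 2 else 1) := by
        split <;> omega
      omega

def lookup_variants_py_alt (symbol : String) : List String :=
  let result := lookup_variants_py_alt_loop [symbol] PySem.Set.empty
  PySem.Set.ofList (result.filter (fun v => v ≠ ""))

-- ===== PRECONDITION & SPEC =====
def Spec_lookup_variants_py (symbol : String) (out : List String) : Prop := out = lookup_variants_py_alt symbol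
instance (symbol : String) (out : List String) : Decidable (Spec_lookup_variants_py symbol out) := by unfold Spec_lookup_variants_py; infer_instance

-- ===== CLAIM (what is proved, stated in full; the proofs are below) =====
def Claim_equal_lookup_variants_py : Prop := ∀ (symbol : String), Dom_lookup_variants_py symbol → Spec_lookup_variants_py symbol (lookup_variants_py symbol)

-- ===== LEMMAS AND PROOFS =====

theorem pv_hE : PySem.Str.upper (PySem.Str.strip "ELV") = "ELV" := by decide

theorem pv_loop_elv (S : PySem.Set String) :
    lookup_variants_py_alt_loop ["ELV"] S = S.add "ELV" := by
  have h1 : PySem.Str.replace "ELV" "." "" = "ELV" := by decide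
  have h2 : PySem.Str.replace "ELV" "." "-" = "ELV" := by decide
  have h3 : PySem.Str.replace "ELV" "-" "" = "ELV" := by decide
  have h4 : PySem.Str.replace "ELV" "-" "." = "ELV" := by decide
  rw [lookup_variants_py_alt_loop]
  simp only [pv_hE, pv_getD_lit, h1, h2, h3, h4]
  simp
  rw [lookup_variants_py_alt_loop]

theorem pv_A_elv : lookup_variants_py "ELV" = ["ELV"] := by
  rw [lookup_variants_py]
  simp only [pv_hE]
  simp
  decide

theorem pv_foldA (l : List String) (init : PySem.Set String) :
    (l.attach.foldl (fun s a => s.update (lookup_variants_py a.1)) init) =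
      l.foldl (fun s a => s.update (lookup_variants_py a)) init := by
  simp

theorem pv_main (symbol : String) :
    lookup_variants_py symbol = lookup_variants_py_alt symbol := by
  by_cases h0 : PySem.Str.upper (PySem.Str.strip symbol) = ""
  · rw [lookup_variants_py, lookup_variants_py_alt, lookup_variants_py_alt_loop]
    simp only [h0, if_true]
    rw [lookup_variants_py_alt_loop]
    rfl
  · by_cases h1 : PySem.Str.upper (PySem.Str.strip symbol) = "ANTM"
    · rw [lookup_variants_py, lookup_variants_py_alt, lookup_variants_py_alt_loop]
      simp only [h1]
      rw [pv_foldA]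
      simp only [h1, pv_getD_lit]
      simp [pv_A_elv]
      rw [pv_loop_elv]
      decide
    · rw [lookup_variants_py, lookup_variants_py_alt, lookup_variants_py_alt_loop]
      simp only [if_neg h0]
      rw [pv_foldA]
      simp only [pv_getD_lit, if_neg h1, List.foldl_nil, List.append_nil]
      rw [lookup_variants_py_alt_loop]
      simp [PySem.Set.ofList, PySem.Set.empty]

-- ===== VERDICT (by name: the statement is the Claim_ definition above) =====
theorem lookup_variants_py_spec : Claim_equal_lookup_variants_py := by
  intro symbol _
  unfold Spec_lookup_variants_py
  exact pv_main symbol
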